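-- pv_equiv track=rewrite | github.com/Alirzeanoroozi/TED | src/data/augment_parquet.py | compute_valid_cut_points
-- ===== SOURCE A (Python) =====
-- from typing import Dict, Iterable, List, Optional, Set, Tuple, Union
--
-- def merge_intervals(intervals: List[Tuple[int, int]]) -> List[Tuple[int, int]]:
--     if not intervals:
--         return []
--     intervals = sorted(intervals)
--     merged = [intervals[0]]
--     for start, end in intervals[1:]:
--         prev_start, prev_end = merged[-1]
--         if start <= prev_end:
--             merged[-1] = (prev_start, max(prev_end, end))
--         else:
--             merged.append((start, end))
--     return merged
--
-- def compute_valid_cut_points(seq_len: int, domains: List[Dict[str, object]]) -> List[int]: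
--     # Protect the whole domain envelope so we never cut between segments of the same domain.
--     protected = merge_intervals([(int(domain["start"]), int(domain["end"])) for domain in domains])
--     valid_points: List[int] = []
--     interval_idx = 0
--     for point in range(seq_len + 1):
--         while interval_idx < len(protected) and point >= protected[interval_idx][1]:
--             interval_idx += 1
--         if interval_idx < len(protected):
--             start, end = protected[interval_idx]
--             if start < point < end:
--                 continue
--         valid_points.append(point)
--     return valid_points
-- ===== SOURCE B (Python) =====
-- def merge_intervals(intervals):
--     if not intervals:
--         return []
--     intervals = sorted(intervals)
--     merged = [intervals[0]]
--     for start, end in intervals[1:]: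
--         prev_start, prev_end = merged[-1]
--         if start <= prev_end:
--             merged[-1] = (prev_start, max(prev_end, end))
--         else:
--             merged.append((start, end))
--     return merged
--
--
-- def compute_valid_cut_points(seq_len, domains):
--     protected = merge_intervals([(int(d["start"]), int(d["end"])) for d in domains])
--     excluded = set()
--     for start, end in protected:
--         excluded.update(range(start + 1, end))
--     return [p for p in range(seq_len + 1) if p not in excluded]
-- ===== Notes on version B (the rewrite author's own statement) =====
-- stated objective: simpler
-- what changed: Replaces A's stateful advancing-pointer sweep over the merged intervals with building a set of all strictly-interior integer points once and then a single membership-filter pass over range(seq_len+1).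
import Mathlib
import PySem

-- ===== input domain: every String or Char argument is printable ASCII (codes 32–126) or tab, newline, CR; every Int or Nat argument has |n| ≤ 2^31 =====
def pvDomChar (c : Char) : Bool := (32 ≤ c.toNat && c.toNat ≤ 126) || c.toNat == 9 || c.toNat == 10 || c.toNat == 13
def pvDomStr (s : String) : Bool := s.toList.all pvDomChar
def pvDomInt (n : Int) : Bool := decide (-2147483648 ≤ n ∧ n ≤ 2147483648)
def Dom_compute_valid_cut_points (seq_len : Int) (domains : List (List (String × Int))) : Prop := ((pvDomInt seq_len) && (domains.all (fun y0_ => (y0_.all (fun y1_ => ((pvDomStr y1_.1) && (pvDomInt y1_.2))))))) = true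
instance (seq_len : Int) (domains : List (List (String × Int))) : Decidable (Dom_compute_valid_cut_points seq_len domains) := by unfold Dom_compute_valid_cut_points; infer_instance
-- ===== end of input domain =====

-- B replaces A's stateful advancing-pointer sweep by building the set of strictly-interior
-- integer points once and filtering range(seq_len+1) by membership (objective: simpler).

-- ===== PORT A =====
-- merge_intervals, shared verbatim by Source A and Source B: sort, then fold updating the last merged
-- interval; the merged list is kept reversed (head = merged[-1]) and reversed at the end.
def mergeStep (merged : List (Int × Int)) (se : Int × Int) : List (Int × Int) :=
  match merged with
  | [] => [se]  -- unreachable: the accumulator is never empty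
  | prev :: tl =>
      if se.1 ≤ prev.2 then (prev.1, max prev.2 se.2) :: tl
      else se :: prev :: tl

def merge_intervals (intervals : List (Int × Int)) : List (Int × Int) :=
  match PySem.List.sorted2 intervals Prod.fst Prod.snd with
  | [] => []
  | first :: rest => (rest.foldl mergeStep [first]).reverse

-- the 'while interval_idx < len(protected) and point >= protected[interval_idx][1]' loop
def advance (prot : List (Int × Int)) (point : Int) (idx : Int) : Int :=
  if h : idx < (prot.length : Int) ∧ (PySem.List.pyGetD prot idx ((0 : Int), (0 : Int))).2 ≤ point then
    advance prot point (idx + 1)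
  else idx
termination_by ((prot.length : Int) - idx).toNat
decreasing_by omega

-- one iteration of A's 'for point in range(seq_len + 1)' loop; state = (interval_idx, valid_points)
def aStep (prot : List (Int × Int)) (st : Int × List Int) (point : Int) : Int × List Int :=
  let idx := advance prot point st.1
  if idx < (prot.length : Int) then
    let se := PySem.List.pyGetD prot idx ((0 : Int), (0 : Int))
    if se.1 < point ∧ point < se.2 then (idx, st.2)
    else (idx, st.2 ++ [point])
  else (idx, st.2 ++ [point])

def compute_valid_cut_points (seq_len : Int) (domains : List (List (String × Int))) : List Int :=
  let prot := merge_intervals (domains.map (fun d =>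
    ((PySem.Dict.mk d).getD "start" 0, (PySem.Dict.mk d).getD "end" 0)))
  ((PySem.List.pyRange 0 (seq_len + 1) 1).foldl (aStep prot) ((0 : Int), ([] : List Int))).2

-- ===== PORT B =====
def compute_valid_cut_points_alt (seq_len : Int) (domains : List (List (String × Int))) : List Int :=
  let prot := merge_intervals (domains.map (fun d =>
    ((PySem.Dict.mk d).getD "start" 0, (PySem.Dict.mk d).getD "end" 0)))
  let excluded : PySem.Set Int :=
    prot.foldl (fun ex se => PySem.Set.update ex (PySem.List.pyRange (se.1 + 1) se.2 1)) PySem.Set.empty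
  (PySem.List.pyRange 0 (seq_len + 1) 1).filter (fun p => !(PySem.Set.contains excluded p))

-- ===== PRECONDITION & SPEC =====
-- Pre_ excludes only inputs where A raises KeyError: a domain dict lacking key "start" or "end".
def Pre_compute_valid_cut_points (seq_len : Int) (domains : List (List (String × Int))) : Prop :=
  ∀ d ∈ domains, (PySem.Dict.mk d).contains "start" = true ∧ (PySem.Dict.mk d).contains "end" = true
instance (seq_len : Int) (domains : List (List (String × Int))) : Decidable (Pre_compute_valid_cut_points seq_len domains) := by unfold Pre_compute_valid_cut_points; infer_instance
def pvWitness_compute_valid_cut_points : Int × (List (List (String × Int))) :=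
  (3, [[("start", 1), ("end", 2)]])

def Spec_compute_valid_cut_points (seq_len : Int) (domains : List (List (String × Int))) (out : List Int) : Prop := out = compute_valid_cut_points_alt seq_len domains
instance (seq_len : Int) (domains : List (List (String × Int))) (out : List Int) : Decidable (Spec_compute_valid_cut_points seq_len domains out) := by unfold Spec_compute_valid_cut_points; infer_instance

-- ===== CLAIM (what is proved, stated in full; the proofs are below) =====
def Claim_equal_compute_valid_cut_points : Prop := ∀ (seq_len : Int) (domains : List (List (String × Int))), Dom_compute_valid_cut_points seq_len domains → Pre_compute_valid_cut_points seq_len domains → Spec_compute_valid_cut_points seq_len domains (compute_valid_cut_points seq_len domains)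

-- ===== LEMMAS AND PROOFS =====

-- "point p lies strictly inside some protected interval"
abbrev strictlyInside (prot : List (Int × Int)) (p : Int) : Prop := ∃ se ∈ prot, se.1 < p ∧ p < se.2

-- Python's lexicographic tuple comparison, as sorted2 uses it
def lexBefore (a b : Int × Int) : Bool :=
  decide (a.1 < b.1) || (!decide (b.1 < a.1) && decide (a.2 < b.2))

theorem lexBefore_asym (a b : Int × Int) (h : lexBefore a b = true) : lexBefore b a = false := by
  simp only [lexBefore, Bool.or_eq_true, Bool.and_eq_true, Bool.not_eq_true',
    decide_eq_true_eq, decide_eq_false_iff_not, Bool.or_eq_false_iff, Bool.and_eq_false_iff,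
    Bool.not_eq_false', not_lt] at *
  omega

theorem lexBefore_trans (a b c : Int × Int) (h1 : lexBefore a b = true)
    (h2 : lexBefore b c = true) : lexBefore a c = true := by
  simp only [lexBefore, Bool.or_eq_true, Bool.and_eq_true, Bool.not_eq_true',
    decide_eq_true_eq, decide_eq_false_iff_not, not_lt] at *
  omega

-- insertion (by an asymmetric, transitive 'before') preserves Pairwise order
theorem insertBy_pairwise (x : Int × Int) (acc : List (Int × Int))
    (hp : acc.Pairwise (fun a b => lexBefore b a = false)) :
    (PySem.List.insertBy lexBefore x acc).Pairwise (fun a b => lexBefore b a = false) := by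
  induction acc with
  | nil => simp [PySem.List.insertBy]
  | cons y ys ih =>
      rw [List.pairwise_cons] at hp
      obtain ⟨hy, hys⟩ := hp
      have hunf : PySem.List.insertBy lexBefore x (y :: ys) =
          if lexBefore x y = true then x :: y :: ys else y :: PySem.List.insertBy lexBefore x ys := rfl
      rw [hunf]
      by_cases hxy : lexBefore x y = true
      · rw [if_pos hxy]
        refine List.Pairwise.cons ?_ (List.Pairwise.cons hy hys)
        intro z hz
        rcases List.mem_cons.mp hz with hz | hz
        · rw [hz]; exact lexBefore_asym x y hxy
        · cases hzx : lexBefore z x with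
          | false => rfl
          | true =>
              have := lexBefore_trans z x y hzx hxy
              rw [hy z hz] at this; exact absurd this (by simp)
      · rw [if_neg hxy]
        refine List.Pairwise.cons ?_ (ih hys)
        intro z hz
        rw [PySem.List.mem_insertBy] at hz
        rcases hz with hz | hz
        · subst hz; simpa using hxy
        · exact hy z hz

theorem foldl_insertBy_pairwise (xs : List (Int × Int)) :
    ∀ init : List (Int × Int), init.Pairwise (fun a b => lexBefore b a = false) →
      (xs.foldl (fun acc x => PySem.List.insertBy lexBefore x acc) init).Pairwise
        (fun a b => lexBefore b a = false) := by
  induction xs with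
  | nil => intro init h; simpa using h
  | cons x xs ih =>
      intro init h
      exact ih _ (insertBy_pairwise x init h)

theorem sorted2_pairwise_fst (xs : List (Int × Int)) :
    (PySem.List.sorted2 xs Prod.fst Prod.snd).Pairwise (fun a b => a.1 ≤ b.1) := by
  have e : PySem.List.sorted2 xs Prod.fst Prod.snd =
      xs.foldl (fun acc x => PySem.List.insertBy lexBefore x acc) [] := rfl
  rw [e]
  refine (foldl_insertBy_pairwise xs [] (by simp)).imp ?_
  intro a b h
  simp only [lexBefore, Bool.or_eq_false_iff, Bool.and_eq_false_iff, Bool.not_eq_false',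
    decide_eq_false_iff_not, decide_eq_true_eq, not_lt] at h
  omega

theorem mergeFold_pairwise :
    ∀ (rest : List (Int × Int)) (prev : Int × Int) (tl : List (Int × Int)),
      rest.Pairwise (fun a b => a.1 ≤ b.1) →
      (∀ u ∈ rest, prev.1 ≤ u.1) →
      (prev :: tl).Pairwise (fun a b => b.1 ≤ a.1) →
      (rest.foldl mergeStep (prev :: tl)).Pairwise (fun a b => b.1 ≤ a.1) := by
  intro rest
  induction rest with
  | nil => intro prev tl _ _ h3; simpa using h3
  | cons se rest ih =>
      intro prev tl h1 h2 h3
      rw [List.pairwise_cons] at h1 h3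
      obtain ⟨h1a, h1b⟩ := h1
      obtain ⟨h3a, h3b⟩ := h3
      rw [List.foldl_cons]
      by_cases hc : se.1 ≤ prev.2
      · rw [show mergeStep (prev :: tl) se = (prev.1, max prev.2 se.2) :: tl by
          simp [mergeStep, hc]]
        refine ih (prev.1, max prev.2 se.2) tl h1b
          (fun u hu => h2 u (List.mem_cons_of_mem se hu)) ?_
        exact List.Pairwise.cons (fun y hy => h3a y hy) h3b
      · rw [show mergeStep (prev :: tl) se = se :: prev :: tl by
          simp [mergeStep, hc]]
        refine ih se (prev :: tl) h1b h1a ?_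
        refine List.Pairwise.cons ?_ (List.Pairwise.cons h3a h3b)
        intro y hy
        rcases List.mem_cons.mp hy with hy | hy
        · subst hy; exact h2 se List.mem_cons_self
        · exact le_trans (h3a y hy) (h2 se List.mem_cons_self)

theorem merge_pairwise (xs : List (Int × Int)) :
    (merge_intervals xs).Pairwise (fun a b => a.1 ≤ b.1) := by
  unfold merge_intervals
  have hs := sorted2_pairwise_fst xs
  cases hsv : PySem.List.sorted2 xs Prod.fst Prod.snd with
  | nil => simp
  | cons first rest =>
      rw [hsv, List.pairwise_cons] at hs
      rw [List.pairwise_reverse]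
      exact mergeFold_pairwise rest first [] hs.2 hs.1 (by simp)

theorem advance_spec (prot : List (Int × Int)) (point : Int) (idx : Int)
    (h0 : 0 ≤ idx) (hle : idx ≤ (prot.length : Int)) :
    0 ≤ advance prot point idx ∧
    idx ≤ advance prot point idx ∧
    advance prot point idx ≤ (prot.length : Int) ∧
    (∀ j : Nat, idx ≤ (j : Int) → (j : Int) < advance prot point idx →
       ∀ hj : j < prot.length, (prot[j]).2 ≤ point) ∧
    (advance prot point idx < (prot.length : Int) →
       point < (PySem.List.pyGetD prot (advance prot point idx) ((0 : Int), (0 : Int))).2) := by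
  rw [advance]
  split
  case isTrue h =>
    obtain ⟨hlt, hend⟩ := h
    have IH := advance_spec prot point (idx + 1) (by omega) (by omega)
    refine ⟨by omega, by omega, IH.2.2.1, ?_, IH.2.2.2.2⟩
    intro j hj1 hj2 hj
    by_cases hje : (j : Int) = idx
    · have : j = idx.toNat := by omega
      subst this
      rw [PySem.List.pyGetD_eq_getElem prot _ h0 (by omega)] at hend
      exact hend
    · exact IH.2.2.2.1 j (by omega) hj2 hj
  case isFalse h =>
    refine ⟨h0, le_refl _, hle, by omega, ?_⟩
    intro hlt
    by_contra hc
    exact h ⟨hlt, by omega⟩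
termination_by ((prot.length : Int) - idx).toNat
decreasing_by omega

theorem decision_iff (prot : List (Int × Int)) (hm : prot.Pairwise (fun a b => a.1 ≤ b.1))
    (a r : Int) (h0 : 0 ≤ r) (hle : r ≤ (prot.length : Int))
    (hpast : ∀ j : Nat, (j : Int) < r → ∀ hj : j < prot.length, (prot[j]).2 ≤ a)
    (hstop : r < (prot.length : Int) →
       a < (PySem.List.pyGetD prot r ((0 : Int), (0 : Int))).2) :
    ((r < (prot.length : Int) ∧
      (PySem.List.pyGetD prot r ((0 : Int), (0 : Int))).1 < a ∧
      a < (PySem.List.pyGetD prot r ((0 : Int), (0 : Int))).2) ↔ strictlyInside prot a) := by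
  constructor
  · rintro ⟨hrl, hs1, hs2⟩
    rw [PySem.List.pyGetD_eq_getElem prot _ h0 hrl] at hs1 hs2
    exact ⟨prot[r.toNat], List.getElem_mem _, hs1, hs2⟩
  · rintro ⟨se, hse, hs1, hs2⟩
    obtain ⟨j, hj, hje⟩ := List.mem_iff_getElem.mp hse
    have hjr : ¬ ((j : Int) < r) := by
      intro hlt
      have := hpast j hlt hj
      rw [hje] at this
      omega
    have hrl : r < (prot.length : Int) := by omega
    have hr2 : r.toNat < prot.length := by omega
    have hmono : (prot[r.toNat]).1 ≤ (prot[j]).1 := by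
      rcases Nat.lt_or_ge r.toNat j with h | h
      · exact List.pairwise_iff_getElem.mp hm r.toNat j hr2 hj h
      · have hrj : r.toNat = j := by omega
        simp [hrj]
    refine ⟨hrl, ?_, hstop hrl⟩
    rw [PySem.List.pyGetD_eq_getElem prot _ h0 hrl]
    have hfst : (prot[j]).1 = se.1 := by rw [hje]
    omega

theorem aloop_eq (prot : List (Int × Int)) (hm : prot.Pairwise (fun a b => a.1 ≤ b.1)) :
    ∀ (n : Nat) (a idx : Int) (acc : List Int), 0 ≤ idx → idx ≤ (prot.length : Int) →
    (∀ j : Nat, (j : Int) < idx → ∀ hj : j < prot.length, (prot[j]).2 ≤ a) →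
    ((PySem.List.pyRange a (a + n) 1).foldl (aStep prot) (idx, acc)).2
      = acc ++ (PySem.List.pyRange a (a + n) 1).filter (fun p => !decide (strictlyInside prot p)) := by
  intro n
  induction n with
  | zero =>
      intro a idx acc _ _ _
      rw [PySem.List.pyRange_one_eq_nil (by push_cast; omega)]
      simp
  | succ n ih =>
      intro a idx acc h0 hle hinv
      have hlt : a < a + ((n + 1 : Nat) : Int) := by push_cast; omega
      rw [PySem.List.pyRange_one_cons hlt, List.foldl_cons, List.filter_cons]
      have hshift : a + ((n + 1 : Nat) : Int) = (a + 1) + (n : Int) := by push_cast; omega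
      set r := advance prot a idx with hr
      have hadv := advance_spec prot a idx h0 hle
      rw [← hr] at hadv
      have hpast : ∀ j : Nat, (j : Int) < r → ∀ hj : j < prot.length, (prot[j]).2 ≤ a := by
        intro j hj1 hj
        by_cases hj2 : (j : Int) < idx
        · exact hinv j hj2 hj
        · exact hadv.2.2.2.1 j (by omega) hj1 hj
      have hdec := decision_iff prot hm a r hadv.1 hadv.2.2.1 hpast hadv.2.2.2.2
      have hstep : aStep prot (idx, acc) a =
          if r < (prot.length : Int) then
            if (PySem.List.pyGetD prot r ((0 : Int), (0 : Int))).1 < a ∧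
               a < (PySem.List.pyGetD prot r ((0 : Int), (0 : Int))).2 then (r, acc)
            else (r, acc ++ [a])
          else (r, acc ++ [a]) := by
        simp only [aStep, ← hr]
      have hinv' : ∀ j : Nat, (j : Int) < r → ∀ hj : j < prot.length, (prot[j]).2 ≤ a + 1 := by
        intro j hj1 hj; have := hpast j hj1 hj; omega
      by_cases hin : strictlyInside prot a
      · obtain ⟨hrl, hc1, hc2⟩ := hdec.mpr hin
        rw [hstep, if_pos hrl, if_pos ⟨hc1, hc2⟩]
        rw [hshift, ih (a + 1) r acc hadv.1 hadv.2.2.1 hinv']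
        simp [hin]
      · have hnc : ¬ (r < (prot.length : Int) ∧
            (PySem.List.pyGetD prot r ((0 : Int), (0 : Int))).1 < a ∧
            a < (PySem.List.pyGetD prot r ((0 : Int), (0 : Int))).2) := fun hc => hin (hdec.mp hc)
        have hstep2 : aStep prot (idx, acc) a = (r, acc ++ [a]) := by
          rw [hstep]
          by_cases hrl : r < (prot.length : Int)
          · rw [if_pos hrl, if_neg (fun hc => hnc ⟨hrl, hc⟩)]
          · rw [if_neg hrl]
        rw [hstep2, hshift, ih (a + 1) r (acc ++ [a]) hadv.1 hadv.2.2.1 hinv']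
        simp [hin]

theorem mem_excluded (prot : List (Int × Int)) :
    ∀ (ex : PySem.Set Int) (p : Int),
      p ∈ prot.foldl (fun ex se => PySem.Set.update ex (PySem.List.pyRange (se.1 + 1) se.2 1)) ex ↔
        p ∈ ex ∨ strictlyInside prot p := by
  induction prot with
  | nil => intro ex p; simp [strictlyInside]
  | cons se rest ih =>
      intro ex p
      rw [List.foldl_cons, ih]
      rw [PySem.Set.mem_update]
      simp only [strictlyInside, List.mem_cons]
      constructor
      · rintro (⟨hp | hp⟩ | ⟨q, hq, h1, h2⟩)
        · exact Or.inl hp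
        · rw [PySem.List.mem_pyRange_one] at hp
          exact Or.inr ⟨se, Or.inl rfl, by omega⟩
        · exact Or.inr ⟨q, Or.inr hq, h1, h2⟩
      · rintro (hp | ⟨q, hq | hq, h1, h2⟩)
        · exact Or.inl (Or.inl hp)
        · subst hq
          exact Or.inl (Or.inr (PySem.List.mem_pyRange_one.mpr (by omega)))
        · exact Or.inr ⟨q, hq, h1, h2⟩

-- ===== VERDICT (by name: the statement is the Claim_ definition above) =====
theorem compute_valid_cut_points_spec : Claim_equal_compute_valid_cut_points := by
  intro seq_len domains _ _
  unfold Spec_compute_valid_cut_points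
  unfold compute_valid_cut_points compute_valid_cut_points_alt
  set prot := merge_intervals (domains.map (fun d =>
    ((PySem.Dict.mk d).getD "start" 0, (PySem.Dict.mk d).getD "end" 0))) with hprot
  have hm := merge_pairwise (domains.map (fun d =>
    ((PySem.Dict.mk d).getD "start" 0, (PySem.Dict.mk d).getD "end" 0)))
  rw [← hprot] at hm
  -- the B side: its filter predicate is pointwise the complement of strictlyInside
  have hBpred : ∀ p : Int,
      (!(PySem.Set.contains
          (prot.foldl (fun ex se => PySem.Set.update ex (PySem.List.pyRange (se.1 + 1) se.2 1))
            PySem.Set.empty) p)) = !decide (strictlyInside prot p) := by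
    intro p
    have hmem : p ∈ prot.foldl (fun ex se => PySem.Set.update ex (PySem.List.pyRange (se.1 + 1) se.2 1))
        PySem.Set.empty ↔ strictlyInside prot p := by
      rw [mem_excluded]
      simp [PySem.Set.empty]
    by_cases h : strictlyInside prot p
    · rw [PySem.Set.contains_iff .. |>.mpr (hmem.mpr h)]
      simp [h]
    · have : ¬ (PySem.Set.contains
          (prot.foldl (fun ex se => PySem.Set.update ex (PySem.List.pyRange (se.1 + 1) se.2 1))
            PySem.Set.empty) p = true) := fun hc => h (hmem.mp ((PySem.Set.contains_iff ..).mp hc))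
      rw [Bool.not_eq_true] at this
      rw [this]
      simp [h]
  -- the A side: the pointer sweep computes the same filter
  have hrange : PySem.List.pyRange 0 (seq_len + 1) 1 =
      PySem.List.pyRange 0 (0 + (((seq_len + 1).toNat : Nat) : Int)) 1 := by
    by_cases h : 0 ≤ seq_len + 1
    · congr 1; omega
    · rw [PySem.List.pyRange_one_eq_nil (by omega), PySem.List.pyRange_one_eq_nil (by omega)]
  rw [hrange]
  rw [aloop_eq prot hm (seq_len + 1).toNat 0 0 [] (le_refl _) (by positivity) (by intro j hj _; omega)]
  rw [List.nil_append]
  exact (List.filter_congr (fun p _ => hBpred p)).symm
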